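-- pv_equiv track=rewrite | github.com/romcoding/rovot | src/rovot/server/routes/models_internal.py | _pick_q4_file
-- ===== SOURCE A (Python) =====
-- _Q4_PREFERENCE = ["Q4_K_M", "Q4_K_S", "Q5_K_M", "Q4_0"]
--
-- def _pick_q4_file(files: list[str]) -> str | None:
--     """Return the best Q4 quantization filename from a list of repo files."""
--     for q in _Q4_PREFERENCE:
--         for f in files:
--             if f.endswith(".gguf") and q.lower() in f.lower():
--                 return f
--     # Fallback: any gguf
--     for f in files:
--         if f.endswith(".gguf") and "Q4" in f.upper():
--             return f
--     return None
-- ===== SOURCE B (Python) =====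
-- _Q4_PREFERENCE = ["Q4_K_M", "Q4_K_S", "Q5_K_M", "Q4_0"]
--
-- def _pick_q4_file(files: list[str]) -> str | None:
--     """Single ranked pass: rank each .gguf file by the first matching
--     preference (0..3), rank 4 for the 'Q4' fallback; keep the earliest
--     file with the smallest rank."""
--     best = None          # (rank, file)
--     for f in files:
--         if not f.endswith(".gguf"):
--             continue
--         low = f.lower()
--         rank = None
--         for i, q in enumerate(_Q4_PREFERENCE):
--             if q.lower() in low:
--                 rank = i
--                 break
--         if rank is None and "Q4" in f.upper():
--             rank = 4
--         if rank is None: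
--             continue
--         if best is None or rank < best[0]:
--             best = (rank, f)
--     return best[1] if best is not None else None
-- ===== Notes on version B (the rewrite author's own statement) =====
-- stated objective: faster
-- what changed: Replaces A's five sequential rescans of the file list (one pass per preference plus a fallback pass) with a single pass that assigns each .gguf file a preference rank (0..3, or 4 for the Q4 fallback) and keeps the earliest file with the smallest rank.
import Mathlib
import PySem

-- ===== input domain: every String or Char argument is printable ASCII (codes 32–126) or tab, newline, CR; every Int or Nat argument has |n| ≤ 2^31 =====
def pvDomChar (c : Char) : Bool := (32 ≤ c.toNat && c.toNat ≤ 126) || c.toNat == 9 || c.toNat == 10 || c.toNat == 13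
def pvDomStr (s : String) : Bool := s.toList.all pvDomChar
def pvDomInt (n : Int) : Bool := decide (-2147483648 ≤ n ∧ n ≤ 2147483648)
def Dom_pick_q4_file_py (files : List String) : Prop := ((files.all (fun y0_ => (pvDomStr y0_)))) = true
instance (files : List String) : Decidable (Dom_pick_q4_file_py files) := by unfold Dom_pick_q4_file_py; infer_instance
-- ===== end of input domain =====

-- B replaces A's five sequential rescans of the list by one ranked pass keeping the
-- earliest file of minimal preference rank (objective: faster; measured faster in a timing run).

-- ===== PORT A =====
def pvPrefs : List String := ["Q4_K_M", "Q4_K_S", "Q5_K_M", "Q4_0"]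

-- inner 'for f in files' loop of A for one preference q
def pvInnerA (q : String) (files : List String) : Option String :=
  match files with
  | [] => none
  | f :: t =>
      if PySem.Str.endswith f ".gguf" && PySem.Str.isIn (PySem.Str.lower q) (PySem.Str.lower f)
      then some f else pvInnerA q t

-- outer 'for q in _Q4_PREFERENCE' loop (a 'return' inside the inner loop ends the outer one)
def pvOuterA (qs : List String) (files : List String) : Option String :=
  match qs with
  | [] => none
  | q :: qt =>
      match pvInnerA q files with
      | some f => some f
      | none => pvOuterA qt files

-- fallback 'for f in files' loop of A
def pvFallbackA (files : List String) : Option String :=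
  match files with
  | [] => none
  | f :: t =>
      if PySem.Str.endswith f ".gguf" && PySem.Str.isIn "Q4" (PySem.Str.upper f)
      then some f else pvFallbackA t

def pick_q4_file_py (files : List String) : Option String :=
  match pvOuterA pvPrefs files with
  | some f => some f
  | none => pvFallbackA files

-- ===== PORT B =====
-- Source B's 'for i, q in enumerate(_Q4_PREFERENCE): … break' loop
def pvFirstIdx (i : Nat) (qs : List String) (low : String) : Option Nat :=
  match qs with
  | [] => none
  | q :: t => if PySem.Str.isIn (PySem.Str.lower q) low then some i else pvFirstIdx (i + 1) t low

-- rank of one file: preference index 0..3, 4 for the Q4 fallback, none otherwise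
def pvRankB (f : String) : Option Nat :=
  if PySem.Str.endswith f ".gguf" then
    match pvFirstIdx 0 pvPrefs (PySem.Str.lower f) with
    | some i => some i
    | none => if PySem.Str.isIn "Q4" (PySem.Str.upper f) then some 4 else none
  else none

-- body of Source B's single 'for f in files' loop: keep earliest file of smallest rank
def pvStepB (best : Option (Nat × String)) (f : String) : Option (Nat × String) :=
  match pvRankB f with
  | none => best
  | some r =>
      match best with
      | none => some (r, f)
      | some (br, bf) => if r < br then some (r, f) else some (br, bf)

def pick_q4_file_py_alt (files : List String) : Option String :=
  match files.foldl pvStepB none with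
  | some (_, f) => some f
  | none => none

-- ===== PRECONDITION & SPEC =====
def Spec_pick_q4_file_py (files : List String) (out : Option String) : Prop := out = pick_q4_file_py_alt files
instance (files : List String) (out : Option String) : Decidable (Spec_pick_q4_file_py files out) := by unfold Spec_pick_q4_file_py; infer_instance

-- ===== CLAIM (what is proved, stated in full; the proofs are below) =====
def Claim_equal_pick_q4_file_py : Prop := ∀ (files : List String), Dom_pick_q4_file_py files → Spec_pick_q4_file_py files (pick_q4_file_py files)

-- ===== LEMMAS AND PROOFS =====

-- the five predicates of A, in preference order (fallback last)
def pvPList : List (String → Bool) :=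
  (pvPrefs.map (fun q f => PySem.Str.endswith f ".gguf" && PySem.Str.isIn (PySem.Str.lower q) (PySem.Str.lower f)))
    ++ [fun f => PySem.Str.endswith f ".gguf" && PySem.Str.isIn "Q4" (PySem.Str.upper f)]

-- first predicate index ≥ i satisfied by f
def pvRankL (i : Nat) (ps : List (String → Bool)) (f : String) : Option Nat :=
  match ps with
  | [] => none
  | p :: t => if p f then some i else pvRankL (i + 1) t f

-- A's shape: first find? that succeeds, level by level
def pvChain (ps : List (String → Bool)) (l : List String) : Option String :=
  match ps with
  | [] => none
  | p :: pt =>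
      match l.find? p with
      | some f => some f
      | none => pvChain pt l

-- right-recursive characterization of B's fold: earliest file of minimal rank
def pvBestH (ρ : String → Option Nat) (l : List String) : Option (Nat × String) :=
  match l with
  | [] => none
  | f :: t =>
      match ρ f, pvBestH ρ t with
      | none, b => b
      | some r, none => some (r, f)
      | some r, some (s, g) => if r ≤ s then some (r, f) else some (s, g)

def pvMerge (acc b : Option (Nat × String)) : Option (Nat × String) :=
  match b with
  | none => acc
  | some (s, g) =>
      match acc with
      | none => some (s, g)
      | some (br, bf) => if s < br then some (s, g) else some (br, bf)

theorem pvFoldl_eq_merge_bestH (l : List String) (acc : Option (Nat × String)) :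
    l.foldl pvStepB acc = pvMerge acc (pvBestH pvRankB l) := by
  induction l generalizing acc with
  | nil => simp [pvBestH, pvMerge]
  | cons f t ih =>
      show List.foldl pvStepB (pvStepB acc f) t = _
      rw [ih]
      rcases hr : pvRankB f with _ | r
      · simp [pvStepB, hr, pvBestH]
      · rcases hb : pvBestH pvRankB t with _ | ⟨s, g⟩ <;>
          rcases acc with _ | ⟨br, bf⟩ <;>
          simp only [pvStepB, hr, pvBestH, hb, pvMerge]
        · by_cases hrs : r ≤ s
          · simp [hrs, show ¬ s < r by omega]
          · simp [hrs, show s < r by omega]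
        · rcases Nat.lt_or_ge r br with hlt | hlt <;> by_cases hrs : r ≤ s
          · simp [if_pos hlt, if_pos hrs, if_neg (show ¬ s < r by omega)]
          · simp [if_pos hlt, if_neg (show ¬ r ≤ s by omega), if_pos (show s < r by omega),
              if_pos (show s < br by omega)]
          · simp [if_neg (show ¬ r < br by omega), if_pos hrs, if_neg (show ¬ s < br by omega)]
          · simp [if_neg (show ¬ r < br by omega), if_neg (show ¬ r ≤ s by omega)]

theorem pvRankL_shift (ps : List (String → Bool)) (i : Nat) (f : String) :
    pvRankL (i + 1) ps f = (pvRankL i ps f).map (· + 1) := by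
  induction ps generalizing i with
  | nil => simp [pvRankL]
  | cons p t ih => by_cases h : p f <;> simp [pvRankL, h, ih]

theorem pvBestH_none (ρ : String → Option Nat) (l : List String)
    (h : ∀ g ∈ l, ρ g = none) : pvBestH ρ l = none := by
  induction l with
  | nil => rfl
  | cons f t ih =>
      have hf := h f (by simp)
      simp [pvBestH, hf, ih (fun g hg => h g (by simp [hg]))]

theorem pvBestH_shift (ρ σ : String → Option Nat) (l : List String)
    (h : ∀ g ∈ l, ρ g = (σ g).map (· + 1)) :
    pvBestH ρ l = (pvBestH σ l).map (fun p => (p.1 + 1, p.2)) := by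
  induction l with
  | nil => rfl
  | cons f t ih =>
      have hf := h f (by simp)
      have iht := ih (fun g hg => h g (by simp [hg]))
      rcases hs : σ f with _ | r
      · simp [pvBestH, hf, hs, iht]
      · rcases hb : pvBestH σ t with _ | ⟨s, g⟩ <;>
          simp [pvBestH, hf, hs, iht, hb] <;> split_ifs <;> simp_all

theorem pvBestH_zero (ρ : String → Option Nat) (p : String → Bool)
    (σ : String → Option Nat)
    (h : ∀ g, ρ g = if p g then some 0 else (σ g).map (· + 1))
    (l : List String) (f : String) (hf : l.find? p = some f) :
    pvBestH ρ l = some (0, f) := by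
  induction l with
  | nil => simp at hf
  | cons a t ih =>
      by_cases hp : p a
      · have : a = f := by simpa [List.find?, hp] using hf
        subst this
        rcases hb : pvBestH ρ t with _ | ⟨s, g⟩ <;> simp [pvBestH, h a, hp, hb]
      · have hft : t.find? p = some f := by simpa [List.find?, hp] using hf
        rcases hs : σ a with _ | r <;> simp [pvBestH, h a, hp, hs, ih hft]

theorem pvChain_eq_bestH (ps : List (String → Bool)) (l : List String) :
    pvChain ps l = (pvBestH (pvRankL 0 ps) l).map Prod.snd := by
  induction ps generalizing l with
  | nil => simp [pvChain, pvBestH_none (pvRankL 0 []) l (fun g _ => rfl)]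
  | cons p pt ih =>
      have hρ : ∀ g, pvRankL 0 (p :: pt) g =
          if p g then some 0 else (pvRankL 0 pt g).map (· + 1) := by
        intro g
        by_cases hp : p g <;> simp [pvRankL, hp, pvRankL_shift]
      rcases hf : l.find? p with _ | f
      · have hnone : ∀ g ∈ l, p g = false := by
          intro g hg
          have := List.find?_eq_none.mp hf g hg
          simpa using this
        have hsh : ∀ g ∈ l, pvRankL 0 (p :: pt) g = (pvRankL 0 pt g).map (· + 1) := by
          intro g hg; simp [hρ g, hnone g hg]
        rw [show pvChain (p :: pt) l = pvChain pt l from by simp [pvChain, hf], ih l,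
          pvBestH_shift _ _ l hsh]
        rcases pvBestH (pvRankL 0 pt) l with _ | ⟨s, g⟩ <;> rfl
      · simp [pvChain, hf, pvBestH_zero _ p (pvRankL 0 pt) hρ l f hf]

-- A equals the chain over the five predicates
theorem pvInnerA_eq_find? (q : String) (l : List String) :
    pvInnerA q l =
      l.find? (fun f => PySem.Str.endswith f ".gguf" && PySem.Str.isIn (PySem.Str.lower q) (PySem.Str.lower f)) := by
  induction l with
  | nil => rfl
  | cons f t ih =>
      simp only [pvInnerA, List.find?_cons, ih]
      cases hc : (PySem.Str.endswith f ".gguf" && PySem.Str.isIn (PySem.Str.lower q) (PySem.Str.lower f)) <;> simp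

theorem pvFallbackA_eq_find? (l : List String) :
    pvFallbackA l =
      l.find? (fun f => PySem.Str.endswith f ".gguf" && PySem.Str.isIn "Q4" (PySem.Str.upper f)) := by
  induction l with
  | nil => rfl
  | cons f t ih =>
      simp only [pvFallbackA, List.find?_cons, ih]
      cases hc : (PySem.Str.endswith f ".gguf" && PySem.Str.isIn "Q4" (PySem.Str.upper f)) <;> simp

theorem pvOuterA_eq_chain (qs : List String) (l : List String) :
    (match pvOuterA qs l with
     | some f => some f
     | none => pvFallbackA l) =
      pvChain
        ((qs.map (fun q f => PySem.Str.endswith f ".gguf" && PySem.Str.isIn (PySem.Str.lower q) (PySem.Str.lower f)))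
          ++ [fun f => PySem.Str.endswith f ".gguf" && PySem.Str.isIn "Q4" (PySem.Str.upper f)]) l := by
  induction qs with
  | nil =>
      simp only [pvOuterA, List.map, List.nil_append, pvChain, ← pvFallbackA_eq_find?]
      rcases pvFallbackA l with _ | f <;> rfl
  | cons q qt ih =>
      simp only [pvOuterA, List.map, List.cons_append, pvChain, ← pvInnerA_eq_find?]
      rcases pvInnerA q l with _ | f
      · exact ih
      · rfl

theorem pvA_eq_chain (l : List String) : pick_q4_file_py l = pvChain pvPList l := by
  rw [pick_q4_file_py, pvPList, ← pvOuterA_eq_chain pvPrefs l]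

-- B's rank function equals the first-index rank over the five predicates
theorem pvRankB_eq_rankL (f : String) : pvRankB f = pvRankL 0 pvPList f := by
  simp only [pvRankB, pvFirstIdx, pvRankL, pvPList, pvPrefs, List.map, List.cons_append,
    List.nil_append]
  simp only [PySem.Str.endswith_eq, PySem.Str.isIn_eq, PySem.Str.toList_lower, PySem.Str.toList_upper]
  split_ifs <;> simp_all

theorem pvB_eq_bestH (l : List String) :
    pick_q4_file_py_alt l = (pvBestH pvRankB l).map Prod.snd := by
  rw [pick_q4_file_py_alt, pvFoldl_eq_merge_bestH]
  rcases h : pvBestH pvRankB l with _ | ⟨r, g⟩ <;> simp [pvMerge]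

theorem pvBestH_congr (ρ σ : String → Option Nat) (h : ∀ g, ρ g = σ g) (l : List String) :
    pvBestH ρ l = pvBestH σ l := by
  induction l with
  | nil => rfl
  | cons f t ih => simp [pvBestH, h f, ih]

-- ===== VERDICT (by name: the statement is the Claim_ definition above) =====
theorem pick_q4_file_py_spec : Claim_equal_pick_q4_file_py := by
  intro files _
  show pick_q4_file_py files = pick_q4_file_py_alt files
  rw [pvA_eq_chain, pvChain_eq_bestH, pvB_eq_bestH,
    pvBestH_congr pvRankB (pvRankL 0 pvPList) pvRankB_eq_rankL files]
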